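-- pv_equiv track=rewrite | github.com/huolongteng/DFlare | torch_dflare_local.py | infer_resnet_blocks
-- ===== SOURCE A (Python) =====
-- def infer_resnet_blocks(state_dict):
--     blocks = []
--     for layer_name in ("layer1", "layer2", "layer3"):
--         indices = []
--         prefix = f"{layer_name}."
--         for key in state_dict.keys():
--             if key.startswith(prefix):
--                 parts = key.split(".")
--                 if len(parts) > 1 and parts[1].isdigit():
--                     indices.append(int(parts[1]))
--         blocks.append(max(indices) + 1 if indices else 0)
--     return blocks
-- ===== SOURCE B (Python) =====
-- def infer_resnet_blocks(state_dict):
--     # Single pass over the keys: keep a running max block index per layer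
--     # (None = layer not seen), then emit counts in fixed order.
--     b1 = b2 = b3 = None
--     for key in state_dict.keys():
--         parts = key.split(".")
--         if len(parts) > 1 and parts[1].isdigit():
--             idx = int(parts[1])
--             if key.startswith("layer1."):
--                 b1 = idx if b1 is None else max(b1, idx)
--             elif key.startswith("layer2."):
--                 b2 = idx if b2 is None else max(b2, idx)
--             elif key.startswith("layer3."):
--                 b3 = idx if b3 is None else max(b3, idx)
--     return [0 if b is None else b + 1 for b in (b1, b2, b3)]
-- ===== Notes on version B (the rewrite author's own statement) =====
-- stated objective: alternative
-- what changed: A scans the whole key list once per layer (three passes, each building a list of block indices and taking its max); B makes a single pass over the keys keeping one running optional max per layer and emits the three counts at the end.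
import Mathlib
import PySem

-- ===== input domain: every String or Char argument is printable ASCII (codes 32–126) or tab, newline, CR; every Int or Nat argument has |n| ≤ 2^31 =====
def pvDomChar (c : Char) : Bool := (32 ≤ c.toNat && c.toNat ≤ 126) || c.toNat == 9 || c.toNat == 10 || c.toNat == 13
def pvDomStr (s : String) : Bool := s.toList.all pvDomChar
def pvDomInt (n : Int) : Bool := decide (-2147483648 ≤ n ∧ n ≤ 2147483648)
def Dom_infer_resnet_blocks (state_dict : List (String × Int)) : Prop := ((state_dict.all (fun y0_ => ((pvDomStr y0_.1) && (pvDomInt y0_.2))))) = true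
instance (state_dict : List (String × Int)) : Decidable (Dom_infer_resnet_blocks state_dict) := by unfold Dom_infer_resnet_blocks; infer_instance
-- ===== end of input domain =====

-- B replaces A's three full scans of the keys by ONE pass keeping a running max block
-- index per layer (objective: alternative decomposition, single pass vs nested passes).

-- ===== PORT A =====
-- literal transliteration of A: for each layer name, scan every key, collect the
-- indices of keys 'layerN.<digits>...', then blocks.append(max(indices)+1 or 0).
-- parts[1] is read with List.getD, exact under the guard 'len(parts) > 1'.
def infer_resnet_blocks (state_dict : List (String × Int)) : List Int :=
  (["layer1", "layer2", "layer3"]).foldl (fun blocks layer_name =>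
    -- indices = []; for key in state_dict.keys(): ...
    let indices := state_dict.foldl (fun indices kv =>
      -- if key.startswith(prefix):   (prefix = f"{layer_name}.")
      if PySem.Chars.startswith kv.1.toList (layer_name.toList ++ ['.']) then
        -- if len(parts) > 1 and parts[1].isdigit(): indices.append(int(parts[1]))
        if decide (1 < (PySem.Chars.splitOn kv.1.toList ['.']).length) &&
           PySem.Chars.strIsdigit ((PySem.Chars.splitOn kv.1.toList ['.']).getD 1 []) then
          indices ++ [(PySem.Int.ofChars? ((PySem.Chars.splitOn kv.1.toList ['.']).getD 1 [])).getD 0]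
        else indices
      else indices) ([] : List Int)
    -- blocks.append(max(indices) + 1 if indices else 0)
    blocks ++ [match PySem.List.max? indices (fun x => x) with
               | some m => m + 1
               | none => 0]) []

-- ===== PORT B =====
-- B-side helper: the assignment 'b = idx if b is None else max(b, idx)'
def pvUpdate (b : Option Int) (idx : Int) : Option Int :=
  match b with
  | none => some idx
  | some m => some (max m idx)

-- literal transliteration of B (Source B): one fold over the keys carrying the triple
-- (b1, b2, b3) of optional running maxima, then emit [0 or b+1] in fixed order.
def infer_resnet_blocks_alt (state_dict : List (String × Int)) : List Int :=
  let st := state_dict.foldl (fun (st : Option Int × Option Int × Option Int) kv =>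
      -- if len(parts) > 1 and parts[1].isdigit():
      if decide (1 < (PySem.Chars.splitOn kv.1.toList ['.']).length) &&
         PySem.Chars.strIsdigit ((PySem.Chars.splitOn kv.1.toList ['.']).getD 1 []) then
        -- idx = int(parts[1]); if/elif on key.startswith("layerN.")
        if PySem.Chars.startswith kv.1.toList "layer1.".toList then
          (pvUpdate st.1 ((PySem.Int.ofChars? ((PySem.Chars.splitOn kv.1.toList ['.']).getD 1 [])).getD 0), st.2.1, st.2.2)
        else if PySem.Chars.startswith kv.1.toList "layer2.".toList then
          (st.1, pvUpdate st.2.1 ((PySem.Int.ofChars? ((PySem.Chars.splitOn kv.1.toList ['.']).getD 1 [])).getD 0), st.2.2)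
        else if PySem.Chars.startswith kv.1.toList "layer3.".toList then
          (st.1, st.2.1, pvUpdate st.2.2 ((PySem.Int.ofChars? ((PySem.Chars.splitOn kv.1.toList ['.']).getD 1 [])).getD 0))
        else st
      else st) ((none, none, none) : Option Int × Option Int × Option Int)
  -- return [0 if b is None else b + 1 for b in (b1, b2, b3)]
  [match st.1 with | none => 0 | some m => m + 1,
   match st.2.1 with | none => 0 | some m => m + 1,
   match st.2.2 with | none => 0 | some m => m + 1]

-- ===== PRECONDITION & SPEC =====
def Spec_infer_resnet_blocks (state_dict : List (String × Int)) (out : List Int) : Prop := out = infer_resnet_blocks_alt state_dict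
instance (state_dict : List (String × Int)) (out : List Int) : Decidable (Spec_infer_resnet_blocks state_dict out) := by unfold Spec_infer_resnet_blocks; infer_instance

-- ===== CLAIM (what is proved, stated in full; the proofs are below) =====
def Claim_equal_infer_resnet_blocks : Prop := ∀ (state_dict : List (String × Int)), Dom_infer_resnet_blocks state_dict → Spec_infer_resnet_blocks state_dict (infer_resnet_blocks state_dict)

-- ===== LEMMAS AND PROOFS =====

-- the per-key filter condition for one layer name, and the extracted index
def pvCond (name : String) (kv : String × Int) : Bool :=
  PySem.Chars.startswith kv.1.toList (name.toList ++ ['.']) &&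
  (decide (1 < (PySem.Chars.splitOn kv.1.toList ['.']).length) &&
   PySem.Chars.strIsdigit ((PySem.Chars.splitOn kv.1.toList ['.']).getD 1 []))

def pvIdx (kv : String × Int) : Int :=
  (PySem.Int.ofChars? ((PySem.Chars.splitOn kv.1.toList ['.']).getD 1 [])).getD 0

def pvList (l : List (String × Int)) (name : String) : List Int :=
  (l.filter (pvCond name)).map pvIdx

def pvBlock (xs : List Int) : Int :=
  match PySem.List.max? xs (fun x => x) with
  | some m => m + 1
  | none => 0

def pvStep (b : Option Int) (x : Int) : Option Int := pvUpdate b x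

def pvOut (b : Option Int) : Int :=
  match b with | none => 0 | some m => m + 1

-- A's inner scan for one layer collects exactly pvList
theorem pv_A_inner (name : String) (l : List (String × Int)) :
    l.foldl (fun indices kv =>
      if PySem.Chars.startswith kv.1.toList (name.toList ++ ['.']) then
        if decide (1 < (PySem.Chars.splitOn kv.1.toList ['.']).length) &&
           PySem.Chars.strIsdigit ((PySem.Chars.splitOn kv.1.toList ['.']).getD 1 []) then
          indices ++ [(PySem.Int.ofChars? ((PySem.Chars.splitOn kv.1.toList ['.']).getD 1 [])).getD 0]
        else indices
      else indices) ([] : List Int) = pvList l name := by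
  have hfun : (fun (indices : List Int) (kv : String × Int) =>
      if PySem.Chars.startswith kv.1.toList (name.toList ++ ['.']) then
        if decide (1 < (PySem.Chars.splitOn kv.1.toList ['.']).length) &&
           PySem.Chars.strIsdigit ((PySem.Chars.splitOn kv.1.toList ['.']).getD 1 []) then
          indices ++ [(PySem.Int.ofChars? ((PySem.Chars.splitOn kv.1.toList ['.']).getD 1 [])).getD 0]
        else indices
      else indices)
      = (fun (indices : List Int) (kv : String × Int) =>
          if pvCond name kv then indices ++ [pvIdx kv] else indices) := by
    funext indices kv
    unfold pvCond pvIdx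
    by_cases h1 : PySem.Chars.startswith kv.1.toList (name.toList ++ ['.']) <;> simp [h1]
  rw [hfun, PySem.List.foldl_append_if]
  rfl

theorem pv_A_eq (l : List (String × Int)) :
    infer_resnet_blocks l =
      [pvBlock (pvList l "layer1"), pvBlock (pvList l "layer2"), pvBlock (pvList l "layer3")] := by
  unfold infer_resnet_blocks
  simp only [List.foldl]
  rw [pv_A_inner "layer1" l, pv_A_inner "layer2" l, pv_A_inner "layer3" l]
  rfl

-- two distinct prefixes of the same length cannot both be prefixes of one key
theorem pv_pfx_excl (cs p q : List Char) (hlen : p.length = q.length) (hne : p ≠ q)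
    (hp : PySem.Chars.startswith cs p = true) : PySem.Chars.startswith cs q = false := by
  cases h : PySem.Chars.startswith cs q with
  | false => rfl
  | true =>
    rw [PySem.Chars.startswith_iff] at hp h
    exact absurd ((List.prefix_of_prefix_length_le hp h (le_of_eq hlen)).eq_of_length hlen) hne

def pvRun (l : List (String × Int)) (name : String) (b : Option Int) : Option Int :=
  (pvList l name).foldl pvStep b

theorem pv_run_cons (kv : String × Int) (t : List (String × Int)) (name : String) (b : Option Int) :
    pvRun (kv :: t) name b = pvRun t name (if pvCond name kv then pvStep b (pvIdx kv) else b) := by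
  unfold pvRun pvList
  by_cases h : pvCond name kv <;> simp [h]

-- B's single fold computes the three per-layer runs independently
theorem pv_B_fold (l : List (String × Int)) : ∀ (b1 b2 b3 : Option Int),
    l.foldl (fun (st : Option Int × Option Int × Option Int) kv =>
      if decide (1 < (PySem.Chars.splitOn kv.1.toList ['.']).length) &&
         PySem.Chars.strIsdigit ((PySem.Chars.splitOn kv.1.toList ['.']).getD 1 []) then
        if PySem.Chars.startswith kv.1.toList "layer1.".toList then
          (pvUpdate st.1 ((PySem.Int.ofChars? ((PySem.Chars.splitOn kv.1.toList ['.']).getD 1 [])).getD 0), st.2.1, st.2.2)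
        else if PySem.Chars.startswith kv.1.toList "layer2.".toList then
          (st.1, pvUpdate st.2.1 ((PySem.Int.ofChars? ((PySem.Chars.splitOn kv.1.toList ['.']).getD 1 [])).getD 0), st.2.2)
        else if PySem.Chars.startswith kv.1.toList "layer3.".toList then
          (st.1, st.2.1, pvUpdate st.2.2 ((PySem.Int.ofChars? ((PySem.Chars.splitOn kv.1.toList ['.']).getD 1 [])).getD 0))
        else st
      else st) (b1, b2, b3)
    = (pvRun l "layer1" b1, pvRun l "layer2" b2, pvRun l "layer3" b3) := by
  induction l with
  | nil => intro b1 b2 b3; rfl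
  | cons kv t ih =>
    intro b1 b2 b3
    rw [List.foldl_cons, pv_run_cons, pv_run_cons, pv_run_cons]
    have h1 : ("layer1".toList ++ ['.']) = "layer1.".toList := by decide
    have h2 : ("layer2".toList ++ ['.']) = "layer2.".toList := by decide
    have h3 : ("layer3".toList ++ ['.']) = "layer3.".toList := by decide
    by_cases hc : (decide (1 < (PySem.Chars.splitOn kv.1.toList ['.']).length) &&
        PySem.Chars.strIsdigit ((PySem.Chars.splitOn kv.1.toList ['.']).getD 1 [])) = true
    · by_cases s1 : PySem.Chars.startswith kv.1.toList "layer1.".toList = true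
      · have e2 : PySem.Chars.startswith kv.1.toList "layer2.".toList = false :=
          pv_pfx_excl _ _ _ (by decide) (by decide) s1
        have e3 : PySem.Chars.startswith kv.1.toList "layer3.".toList = false :=
          pv_pfx_excl _ _ _ (by decide) (by decide) s1
        have c1 : pvCond "layer1" kv = true := by unfold pvCond; rw [h1, s1, hc]; rfl
        have c2 : pvCond "layer2" kv = false := by unfold pvCond; rw [h2, e2]; rfl
        have c3 : pvCond "layer3" kv = false := by unfold pvCond; rw [h3, e3]; rfl
        simp only [hc, s1, e2, e3, c1, c2, c3, if_true, Bool.false_eq_true, if_false]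
        exact ih _ _ _
      · have s1' : PySem.Chars.startswith kv.1.toList "layer1.".toList = false := by
          revert s1; cases PySem.Chars.startswith kv.1.toList "layer1.".toList <;> simp
        have c1 : pvCond "layer1" kv = false := by unfold pvCond; rw [h1, s1']; rfl
        by_cases s2 : PySem.Chars.startswith kv.1.toList "layer2.".toList = true
        · have e3 : PySem.Chars.startswith kv.1.toList "layer3.".toList = false :=
            pv_pfx_excl _ _ _ (by decide) (by decide) s2
          have c2 : pvCond "layer2" kv = true := by unfold pvCond; rw [h2, s2, hc]; rfl
          have c3 : pvCond "layer3" kv = false := by unfold pvCond; rw [h3, e3]; rfl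
          simp only [hc, s1', s2, e3, c1, c2, c3, if_true, Bool.false_eq_true, if_false]
          exact ih _ _ _
        · have s2' : PySem.Chars.startswith kv.1.toList "layer2.".toList = false := by
            revert s2; cases PySem.Chars.startswith kv.1.toList "layer2.".toList <;> simp
          have c2 : pvCond "layer2" kv = false := by unfold pvCond; rw [h2, s2']; rfl
          by_cases s3 : PySem.Chars.startswith kv.1.toList "layer3.".toList = true
          · have c3 : pvCond "layer3" kv = true := by unfold pvCond; rw [h3, s3, hc]; rfl
            simp only [hc, s1', s2', s3, c1, c2, c3, if_true, Bool.false_eq_true, if_false]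
            exact ih _ _ _
          · have s3' : PySem.Chars.startswith kv.1.toList "layer3.".toList = false := by
              revert s3; cases PySem.Chars.startswith kv.1.toList "layer3.".toList <;> simp
            have c3 : pvCond "layer3" kv = false := by unfold pvCond; rw [h3, s3']; rfl
            simp only [hc, s1', s2', s3', c1, c2, c3, if_true, Bool.false_eq_true, if_false]
            exact ih _ _ _
    · have hc' : (decide (1 < (PySem.Chars.splitOn kv.1.toList ['.']).length) &&
          PySem.Chars.strIsdigit ((PySem.Chars.splitOn kv.1.toList ['.']).getD 1 [])) = false := by
        revert hc
        cases (decide (1 < (PySem.Chars.splitOn kv.1.toList ['.']).length) &&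
          PySem.Chars.strIsdigit ((PySem.Chars.splitOn kv.1.toList ['.']).getD 1 [])) <;> simp
      have c1 : pvCond "layer1" kv = false := by unfold pvCond; rw [h1, hc', Bool.and_false]
      have c2 : pvCond "layer2" kv = false := by unfold pvCond; rw [h2, hc', Bool.and_false]
      have c3 : pvCond "layer3" kv = false := by unfold pvCond; rw [h3, hc', Bool.and_false]
      simp only [hc', c1, c2, c3, Bool.false_eq_true, if_false]
      exact ih _ _ _

theorem pv_foldl_step_some (t : List Int) : ∀ (m : Int), t.foldl pvStep (some m) = some (t.foldl max m) := by
  induction t with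
  | nil => intro m; rfl
  | cons x s ih => intro m; simp only [List.foldl_cons, pvStep, pvUpdate]; exact ih (max m x)

-- the running optional max reproduces A's 'max(indices)+1 if indices else 0'
theorem pv_out_run (xs : List Int) : pvOut (xs.foldl pvStep none) = pvBlock xs := by
  cases xs with
  | nil => rfl
  | cons x t =>
    simp only [List.foldl_cons, pvBlock, PySem.List.max?_id_cons]
    have : pvStep none x = some x := rfl
    rw [this, pv_foldl_step_some t x]
    rfl

theorem pv_B_eq (l : List (String × Int)) :
    infer_resnet_blocks_alt l =
      [pvOut (pvRun l "layer1" none), pvOut (pvRun l "layer2" none), pvOut (pvRun l "layer3" none)] := by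
  unfold infer_resnet_blocks_alt
  rw [pv_B_fold l none none none]
  rfl

-- ===== VERDICT (by name: the statement is the Claim_ definition above) =====
theorem infer_resnet_blocks_spec : Claim_equal_infer_resnet_blocks := by
  intro l _
  unfold Spec_infer_resnet_blocks
  rw [pv_A_eq, pv_B_eq]
  unfold pvRun
  rw [pv_out_run, pv_out_run, pv_out_run]
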